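-- pv_equiv track=rewrite | github.com/daniel-reich/ubiquitous-fiesta | mrrKngM2fqDEDMXtS_2.py | can_patch
-- ===== SOURCE A (Python) =====
-- def can_patch(bridge, planks):
--   gaps = [i for i in ''.join(map(str, bridge)).split('1') if len(i) != 0]
--
--   for gap in gaps:
--     gap_filled = False
--
--     if len(gap) == 1:
--         gap_filled = True
--
--     else:
--       for plank in sorted(planks):
--         if len(gap) - plank < 2:
--           planks.remove(plank)
--           gap_filled = True
--           break
--
--     if not gap_filled:
--       return False
--
--   return True
-- ===== SOURCE B (Python) =====
-- def can_patch(bridge, planks):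
--     sp = sorted(planks)  # one sorted copy, maintained as a sorted multiset (does not mutate planks)
--     joined = ''.join(map(str, bridge))
--     for piece in joined.split('1'):
--         need = len(piece) - 1
--         if need >= 1:
--             # binary search: leftmost index with sp[idx] >= need
--             lo, hi = 0, len(sp)
--             while lo < hi:
--                 mid = (lo + hi) // 2
--                 if sp[mid] < need:
--                     lo = mid + 1
--                 else:
--                     hi = mid
--             if lo == len(sp):
--                 return False
--             sp.pop(lo)
--     return True
-- ===== Notes on version B (the rewrite author's own statement) =====
-- stated objective: faster
-- what changed: Instead of re-sorting the remaining planks and scanning them linearly for every gap, B sorts the planks once into a sorted multiset and, per gap, binary-searches for the smallest adequate plank and removes it by index.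
import Mathlib
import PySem

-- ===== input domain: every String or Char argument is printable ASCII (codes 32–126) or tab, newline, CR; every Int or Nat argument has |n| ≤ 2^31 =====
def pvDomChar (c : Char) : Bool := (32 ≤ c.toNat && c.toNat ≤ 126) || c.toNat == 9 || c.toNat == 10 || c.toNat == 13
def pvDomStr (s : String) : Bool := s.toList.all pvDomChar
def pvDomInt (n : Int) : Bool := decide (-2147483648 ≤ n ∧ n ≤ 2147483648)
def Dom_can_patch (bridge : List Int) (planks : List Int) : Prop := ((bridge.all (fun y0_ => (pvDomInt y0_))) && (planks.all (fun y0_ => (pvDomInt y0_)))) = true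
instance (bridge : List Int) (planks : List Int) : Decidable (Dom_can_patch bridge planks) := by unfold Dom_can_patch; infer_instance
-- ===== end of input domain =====

-- B replaces A's per-gap re-sort + linear scan of the planks by one initial sort kept as a
-- sorted multiset with a per-gap binary search and index removal (faster in a timing run).
-- A mutates its `planks` argument in place (planks.remove); B does not — the equivalence proved
-- here is about the RETURN value only.

-- ===== PORT A =====
-- inner 'for plank in sorted(planks): if len(gap) - plank < 2: … break' — first plank passing the test
def pvScanA (ps : List Int) (len : Int) : Option Int :=
  match ps with
  | [] => none
  | p :: rest => if len - p < 2 then some p else pvScanA rest len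

-- the 'for gap in gaps' loop, with the mutable planks list as state
def pvLoopA (gaps : List (List Char)) (planks : List Int) : Bool :=
  match gaps with
  | [] => true
  | g :: rest =>
    if g.length = 1 then pvLoopA rest planks
    else
      match pvScanA (PySem.List.sorted planks (fun x => x) false) (g.length : Int) with
      | none => false                                   -- gap_filled stayed False
      | some p => pvLoopA rest ((PySem.List.remove? planks p).getD planks)
        -- planks.remove(plank): plank was drawn from sorted(planks), so it is present
        -- and the .getD fallback is unreachable

def can_patch (bridge : List Int) (planks : List Int) : Bool :=
  pvLoopA ((PySem.Chars.splitOn (PySem.Chars.join [] (bridge.map PySem.Int.toChars)) ['1']).filter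
      (fun g => decide (g.length ≠ 0))) planks

-- ===== PORT B =====
-- the 'while lo < hi' binary search of Source B, step for step
def pvBisect (sp : List Int) (need : Int) (lo hi : Nat) : Nat :=
  if lo < hi then
    if sp.getD ((lo + hi) / 2) 0 < need then pvBisect sp need ((lo + hi) / 2 + 1) hi
    else pvBisect sp need lo ((lo + hi) / 2)
  else lo
termination_by hi - lo
decreasing_by all_goals omega

-- the 'for piece in joined.split('1')' loop, with the sorted plank list as state
def pvLoopB (gaps : List (List Char)) (sp : List Int) : Bool :=
  match gaps with
  | [] => true
  | g :: rest =>
    if 1 ≤ (g.length : Int) - 1 then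
      if pvBisect sp ((g.length : Int) - 1) 0 sp.length = sp.length then false
      else pvLoopB rest (sp.eraseIdx (pvBisect sp ((g.length : Int) - 1) 0 sp.length))
        -- sp.pop(lo): lo < len(sp) in this branch, eraseIdx is the resulting list (the popped value is unused)
    else pvLoopB rest sp

def can_patch_alt (bridge : List Int) (planks : List Int) : Bool :=
  pvLoopB (PySem.Chars.splitOn (PySem.Chars.join [] (bridge.map PySem.Int.toChars)) ['1'])
    (PySem.List.sorted planks (fun x => x) false)

-- ===== PRECONDITION & SPEC =====
def Spec_can_patch (bridge : List Int) (planks : List Int) (out : Bool) : Prop := out = can_patch_alt bridge planks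
instance (bridge : List Int) (planks : List Int) (out : Bool) : Decidable (Spec_can_patch bridge planks out) := by unfold Spec_can_patch; infer_instance

-- ===== CLAIM (what is proved, stated in full; the proofs are below) =====
def Claim_equal_can_patch : Prop := ∀ (bridge : List Int) (planks : List Int), Dom_can_patch bridge planks → Spec_can_patch bridge planks (can_patch bridge planks)

-- ===== LEMMAS AND PROOFS =====

-- a sorted list is monotone at indices (via getD)
lemma pv_sorted_getD_mono {sp : List Int} (hs : sp.Pairwise (· ≤ ·)) {i j : Nat}
    (hij : i ≤ j) (hj : j < sp.length) : sp.getD i 0 ≤ sp.getD j 0 := by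
  rcases Nat.lt_or_ge i j with h | h
  · rw [List.getD_eq_getElem _ _ (Nat.lt_of_le_of_lt hij hj), List.getD_eq_getElem _ _ hj]
    exact List.pairwise_iff_getElem.mp hs i j _ _ h
  · have : i = j := Nat.le_antisymm hij h
    subst this; exact le_refl _

-- the binary search returns the boundary index: everything before it is < need, everything from it on is ≥ need
lemma pvBisect_spec (sp : List Int) (need : Int) :
    ∀ (lo hi : Nat), lo ≤ hi → hi ≤ sp.length →
    (∀ i, i < lo → sp.getD i 0 < need) →
    (∀ i, hi ≤ i → i < sp.length → need ≤ sp.getD i 0) →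
    sp.Pairwise (· ≤ ·) →
    (pvBisect sp need lo hi ≤ sp.length ∧
     (∀ i, i < pvBisect sp need lo hi → sp.getD i 0 < need) ∧
     (∀ i, pvBisect sp need lo hi ≤ i → i < sp.length → need ≤ sp.getD i 0)) := by
  intro lo hi
  induction lo, hi using pvBisect.induct sp need with
  | case1 lo hi hlt hmid ih =>
    intro _ hhi hlo hhi2 hs
    rw [pvBisect, if_pos hlt, if_pos hmid]
    refine ih (by omega) hhi ?_ hhi2 hs
    intro i hi'
    exact lt_of_le_of_lt (pv_sorted_getD_mono hs (by omega) (by omega)) hmid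
  | case2 lo hi hlt hmid ih =>
    intro _ hhi hlo hhi2 hs
    rw [pvBisect, if_pos hlt, if_neg hmid]
    refine ih (by omega) (by omega) hlo ?_ hs
    intro i hle hilen
    exact le_trans (not_lt.mp hmid) (pv_sorted_getD_mono hs hle hilen)
  | case3 lo hi hlt =>
    intro hle hhi hlo hhi2 hs
    have : lo = hi := by omega
    rw [pvBisect, if_neg hlt]
    exact ⟨by omega, hlo, fun i h1 h2 => hhi2 i (by omega) h2⟩

lemma pvScanA_none (sp : List Int) (len : Int) (h : ∀ p ∈ sp, ¬ (len - p < 2)) :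
    pvScanA sp len = none := by
  induction sp with
  | nil => rfl
  | cons p rest ih =>
    rw [pvScanA, if_neg (h p (List.mem_cons_self ..))]
    exact ih (fun q hq => h q (List.mem_cons_of_mem _ hq))

lemma pvScanA_at (sp : List Int) (len : Int) :
    ∀ (lo : Nat), lo < sp.length →
    (∀ i, i < lo → ¬ (len - sp.getD i 0 < 2)) →
    (len - sp.getD lo 0 < 2) →
    pvScanA sp len = some (sp.getD lo 0) := by
  induction sp with
  | nil => intro lo h; simp at h
  | cons p rest ih =>
    intro lo hlt hbelow hat
    cases lo with
    | zero => simp only [List.getD_cons_zero] at hat ⊢; rw [pvScanA, if_pos hat]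
    | succ k =>
      have hp : ¬ (len - p < 2) := by
        have := hbelow 0 (Nat.succ_pos k); simpa using this
      simp only [List.getD_cons_succ] at hat ⊢
      rw [pvScanA, if_neg hp]
      exact ih k (by simpa using hlt) (fun i hik => by simpa using hbelow (i + 1) (by omega)) hat

-- removing the element at index lo of sorted(planks) is removing that value from planks and re-sorting
lemma pv_sorted_erase_eq (planks : List Int) (lo : Nat)
    (hlo : lo < (PySem.List.sorted planks (fun x => x) false).length) :
    PySem.List.sorted (planks.erase ((PySem.List.sorted planks (fun x => x) false).getD lo 0)) (fun x => x) false
      = (PySem.List.sorted planks (fun x => x) false).eraseIdx lo := by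
  set sp := PySem.List.sorted planks (fun x => x) false with hsp
  set v := sp.getD lo 0 with hv
  have hget : v = sp[lo] := by rw [hv, List.getD_eq_getElem _ _ hlo]
  have hmemsp : v ∈ sp := hget ▸ List.getElem_mem hlo
  have hperm1 : sp.Perm planks := PySem.List.sorted_perm ..
  have hmem : v ∈ planks := hperm1.mem_iff.mp hmemsp
  -- v :: sp.eraseIdx lo ~ sp
  have hsplit : sp = sp.take lo ++ v :: sp.drop (lo + 1) := by
    rw [hget]
    conv_lhs => rw [← List.take_append_drop lo sp, List.drop_eq_getElem_cons hlo]
  have hcons : (v :: sp.eraseIdx lo).Perm sp := by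
    rw [List.eraseIdx_eq_take_drop_succ]
    calc (v :: (sp.take lo ++ sp.drop (lo + 1))).Perm (sp.take lo ++ v :: sp.drop (lo + 1)) :=
          List.perm_middle.symm
      _ = sp := hsplit.symm
  have hperm : (sp.eraseIdx lo).Perm (planks.erase v) := by
    have h2 : (v :: sp.eraseIdx lo).Perm (v :: planks.erase v) :=
      hcons.trans (hperm1.trans (List.perm_cons_erase hmem))
    exact (List.perm_cons v).mp h2
  have hpw : (sp.eraseIdx lo).Pairwise (· ≤ ·) :=
    (hsp ▸ PySem.List.sorted_pairwise planks (fun x => x)).sublist (List.eraseIdx_sublist sp lo)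
  exact PySem.List.sorted_id_eq_of_perm_of_pairwise _ _ hperm hpw

-- the core equivalence: B's loop over all pieces with the sorted multiset equals
-- A's loop over the nonempty pieces with the raw plank list
lemma pvLoop_eq (gaps : List (List Char)) :
    ∀ planks : List Int,
      pvLoopB gaps (PySem.List.sorted planks (fun x => x) false)
        = pvLoopA (gaps.filter (fun g => decide (g.length ≠ 0))) planks := by
  induction gaps with
  | nil => intro planks; rfl
  | cons g rest ih =>
    intro planks
    set sp := PySem.List.sorted planks (fun x => x) false with hsp
    have hfil0 : ∀ (h : g.length = 0), (g :: rest).filter (fun g => decide (g.length ≠ 0))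
        = rest.filter (fun g => decide (g.length ≠ 0)) := by
      intro h; rw [List.length_eq_zero_iff.mp h]; simp
    have hfil : ∀ (h : g.length ≠ 0), (g :: rest).filter (fun g => decide (g.length ≠ 0))
        = g :: rest.filter (fun g => decide (g.length ≠ 0)) := by
      intro h
      cases g with
      | nil => simp at h
      | cons c t => simp
    by_cases h0 : g.length = 0
    · rw [hfil0 h0]
      show (if 1 ≤ (g.length : Int) - 1 then _ else pvLoopB rest sp) = _
      rw [if_neg (by omega)]
      exact ih planks
    · rw [hfil h0]
      by_cases h1 : g.length = 1
      · show (if 1 ≤ (g.length : Int) - 1 then _ else pvLoopB rest sp)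
          = (if g.length = 1 then pvLoopA (rest.filter (fun g => decide (g.length ≠ 0))) planks else _)
        rw [if_neg (by omega), if_pos h1]
        exact ih planks
      · -- g.length ≥ 2
        have h2 : 2 ≤ g.length := by omega
        have hs : sp.Pairwise (· ≤ ·) := hsp ▸ PySem.List.sorted_pairwise planks (fun x => x)
        obtain ⟨hB1, hB2, hB3⟩ := pvBisect_spec sp ((g.length : Int) - 1) 0 sp.length
          (Nat.zero_le _) (le_refl _) (by omega) (by omega) hs
        set lo := pvBisect sp ((g.length : Int) - 1) 0 sp.length with hlo
        simp only [pvLoopB, pvLoopA, ← hsp, ← hlo]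
        rw [if_pos (by omega : (1 : Int) ≤ (g.length : Int) - 1), if_neg h1]
        by_cases hend : lo = sp.length
        · rw [if_pos hend]
          have hnone : pvScanA sp (g.length : Int) = none := by
            apply pvScanA_none
            intro p hp
            obtain ⟨i, hi, hpi⟩ := List.mem_iff_getElem.mp hp
            have := hB2 i (by omega)
            rw [List.getD_eq_getElem _ _ hi, hpi] at this
            omega
          rw [hnone]
        · rw [if_neg hend]
          have hlt : lo < sp.length := by omega
          have hsome : pvScanA sp (g.length : Int) = some (sp.getD lo 0) := by
            apply pvScanA_at sp _ lo hlt
            · intro i hi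
              have := hB2 i hi; omega
            · have := hB3 lo (le_refl _) hlt; omega
          rw [hsome]
          show _ = pvLoopA (List.filter (fun g => decide (g.length ≠ 0)) rest)
            ((PySem.List.remove? planks (sp.getD lo 0)).getD planks)
          have hmem : sp.getD lo 0 ∈ planks := by
            have h1' : sp.getD lo 0 ∈ sp := by
              rw [List.getD_eq_getElem _ _ hlt]; exact List.getElem_mem hlt
            exact (PySem.List.sorted_perm ..).mem_iff.mp h1'
          rw [PySem.List.remove?_eq_some_erase _ _ hmem, Option.getD_some,
            ← ih (planks.erase (sp.getD lo 0))]
          congr 1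
          have heq := pv_sorted_erase_eq planks lo (hsp ▸ hlt)
          rw [← hsp] at heq
          exact heq.symm

-- ===== VERDICT (by name: the statement is the Claim_ definition above) =====
theorem can_patch_spec : Claim_equal_can_patch := by
  intro bridge planks _
  unfold Spec_can_patch can_patch can_patch_alt
  exact (pvLoop_eq _ planks).symm
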